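-- pv_equiv track=rewrite | github.com/IhabSabik/reconstruction | Functions.py | components_edges
-- ===== SOURCE A (Python) =====
-- def setdiff(lst_1, lst_2):
--     """ returns the set difference lst_1 - lst_2. """
--
--     if isinstance(lst_1, int) or isinstance(lst_1, float):
--         return setdiff([lst_1], lst2)
--     if isinstance(lst_2, int) or isinstance(lst_2, float):
--         return setdiff(lst_1, [lst_2])
--     return sorted(list(set(lst_1) - set(lst_2)))
--
-- def union(*lsts):
--     """ returns the union of multiple lists. """
--
--     def union_utility(lst_1, lst_2):
--         if isinstance(lst_1, int) or isinstance(lst_1, float):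
--             return union([lst_1], lst_2)
--         if isinstance(lst_2, int) or isinstance(lst_2, float):
--             return union(lst_1, [lst_2])
--         return sorted(list(set(lst_1) | set(lst_2)))
--
--     lst = []
--     for item in lsts:
--         lst = union_utility(lst, item)
--     return lst
--
-- def components_edges(edges):
--     """ returns the connected components of edges. """
--
--     temp = unique(edges)
--     r = len(temp)
--     Components = []
--     m = -1
--     list_all = []
--     while len(list_all) != r:
--         m += 1
--         temp = sorted(setdiff(temp, list_all))
--         Components.append(temp[0])
--         n = 0
--         Components[m] = [Components[m]]
--         while n != len(Components[m]):
--             n = len(Components[m])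
--             for j in setdiff(temp, Components[m]):
--                 for k in Components[m]:
--                     if isline([j, k], edges):
--                         Components[m] = union(Components[m], [j])
--                         break
--         for element in Components:
--             list_all = union(list_all, element)
--     return Components
--
-- def unique(lst):
--     """ returns the unique elements of a list. """
--
--     out = []
--     for item in lst:
--         out = union(out, item)
--     return out
--
-- def isline(lst, Matrix):
--     if not Matrix:
--         return False
--     if isinstance(Matrix[0], int):
--         Matrix = [Matrix]
--     if isinstance(lst, int):
--         return any(lst in item for item in Matrix)
--     else:
--         for item in Matrix:
--             if set(lst).issubset(set(item)):
--                 return True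
--         return False
-- ===== SOURCE B (Python) =====
-- def components_edges(edges):
--     """ returns the connected components of edges. """
--
--     verts = sorted({v for e in edges for v in e})
--     out = []
--     seen = set()
--     for v in verts:
--         if v not in seen:
--             comp = {v}
--             for _ in verts:
--                 for e in edges:
--                     if not comp.isdisjoint(e):
--                         comp.update(e)
--             comp = sorted(comp)
--             seen.update(comp)
--             out.append(comp)
--     return out
-- ===== Notes on version B (the rewrite author's own statement) =====
-- stated objective: faster
-- what changed: A grows each component one vertex at a time, re-testing every remaining vertex against every member with isline and re-sorting via setdiff/union on each step; B scans the sorted vertex list once and floods each unseen seed's component by whole-edge absorption (merge every edge that intersects the current set), skipping vertices already placed.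
import Mathlib
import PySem

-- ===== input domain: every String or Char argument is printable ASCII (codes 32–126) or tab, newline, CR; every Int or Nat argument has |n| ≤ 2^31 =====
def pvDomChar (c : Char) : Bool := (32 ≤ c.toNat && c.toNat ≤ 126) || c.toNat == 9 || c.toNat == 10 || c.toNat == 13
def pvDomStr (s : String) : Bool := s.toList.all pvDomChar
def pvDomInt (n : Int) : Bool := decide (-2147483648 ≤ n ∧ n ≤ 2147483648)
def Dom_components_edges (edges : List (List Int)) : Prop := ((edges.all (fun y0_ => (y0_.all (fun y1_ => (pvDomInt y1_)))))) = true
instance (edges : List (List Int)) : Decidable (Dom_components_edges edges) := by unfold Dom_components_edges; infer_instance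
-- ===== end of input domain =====

-- B replaces A's one-vertex-at-a-time component growth (isline tests of every remaining vertex
-- against every member, with setdiff/union/sort on each step) by whole-edge flooding over the
-- sorted vertex list; measured faster (asymptotically fewer adjacency probes).

-- ===== PORT A =====
-- union_utility(lst_1, lst_2) for two lists: sorted(list(set(lst_1) | set(lst_2)))
def pvUnion2 (a b : List Int) : List Int :=
  PySem.List.sorted (PySem.Set.union (PySem.Set.ofList a) (PySem.Set.ofList b)) (fun x => x) false

-- union(*lsts): lst = []; for item in lsts: lst = union_utility(lst, item)
def pvUnion (lsts : List (List Int)) : List Int := lsts.foldl (fun lst item => pvUnion2 lst item) []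

-- setdiff(lst_1, lst_2) for two lists: sorted(list(set(lst_1) - set(lst_2)))
def pvSetdiff (a b : List Int) : List Int :=
  PySem.List.sorted (PySem.Set.diff (PySem.Set.ofList a) (PySem.Set.ofList b)) (fun x => x) false

-- unique(lst): out = []; for item in lst: out = union(out, item)
def pvUniqueA (lst : List (List Int)) : List Int := lst.foldl (fun out item => pvUnion [out, item]) []

-- isline(lst, Matrix) as called here (lst a 2-list, Matrix a list of lists)
def pvIsline (lst : List Int) (M : List (List Int)) : Bool :=
  if M = [] then false
  else M.any (fun item => PySem.Set.issubset (PySem.Set.ofList lst) (PySem.Set.ofList item))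

-- one body of A's inner 'while': for j in setdiff(temp, comp): for k in comp: if isline([j,k], edges): comp = union(comp,[j]); break
def pvGrowPass (edges : List (List Int)) (temp comp : List Int) : List Int :=
  (pvSetdiff temp comp).foldl
    (fun c j => if c.any (fun k => pvIsline [j, k] edges) then pvUnion [c, [j]] else c) comp

-- A's inner 'while n != len(Components[m])' (fuel only makes the loop total; it never runs out)
def pvGrowLoop (edges : List (List Int)) (temp : List Int) : Nat → Int → List Int → List Int
  | 0, _, comp => comp
  | fuel+1, n, comp =>
    if n = PySem.List.len comp then comp
    else pvGrowLoop edges temp fuel (PySem.List.len comp) (pvGrowPass edges temp comp)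

-- A's outer 'while len(list_all) != r' (fuel only makes the loop total; the [] branch is dead)
def pvOuter (edges : List (List Int)) (r : Int) : Nat → List Int → List (List Int) → List Int → List (List Int)
  | 0, _, Components, _ => Components
  | fuel+1, temp, Components, list_all =>
    if PySem.List.len list_all = r then Components
    else
      match PySem.List.sorted (pvSetdiff temp list_all) (fun x => x) false with
      | [] => Components
      | t0 :: rest =>
        let temp' := t0 :: rest
        let comp := pvGrowLoop edges temp' (temp'.length + 2) 0 [t0]
        let Components' := Components ++ [comp]
        let list_all' := Components'.foldl (fun la el => pvUnion [la, el]) list_all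
        pvOuter edges r fuel temp' Components' list_all'

def components_edges (edges : List (List Int)) : List (List Int) :=
  let temp := pvUniqueA edges
  let r := PySem.List.len temp
  pvOuter edges r (temp.length + 1) temp [] []

-- ===== PORT B =====
-- one sweep: for e in edges: if not comp.isdisjoint(e): comp.update(e)
def pvSweep (edges : List (List Int)) (comp : PySem.Set Int) : PySem.Set Int :=
  edges.foldl (fun c e => if PySem.Set.isdisjoint c e then c else PySem.Set.update c e) comp

-- for _ in verts: one sweep
def pvFlood (edges : List (List Int)) (verts : List Int) (comp : PySem.Set Int) : PySem.Set Int :=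
  verts.foldl (fun c _ => pvSweep edges c) comp

-- verts = sorted({v for e in edges for v in e})
def pvVerts (edges : List (List Int)) : List Int :=
  PySem.List.sorted (PySem.Set.ofList edges.flatten) (fun x => x) false

def components_edges_alt (edges : List (List Int)) : List (List Int) :=
  let verts := pvVerts edges
  (verts.foldl (fun (st : List (List Int) × PySem.Set Int) v =>
      if st.2.contains v then st
      else
        let comp := PySem.List.sorted (pvFlood edges verts (PySem.Set.ofList [v])) (fun x => x) false
        (st.1 ++ [comp], PySem.Set.update st.2 comp))
    ([], PySem.Set.empty)).1

-- ===== PRECONDITION & SPEC =====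
def Spec_components_edges (edges : List (List Int)) (out : List (List Int)) : Prop := out = components_edges_alt edges
instance (edges : List (List Int)) (out : List (List Int)) : Decidable (Spec_components_edges edges out) := by unfold Spec_components_edges; infer_instance

-- ===== CLAIM (what is proved, stated in full; the proofs are below) =====
def Claim_equal_components_edges : Prop := ∀ (edges : List (List Int)), Dom_components_edges edges → Spec_components_edges edges (components_edges edges)

-- ===== LEMMAS AND PROOFS =====

-- x and y share an edge
def pvStep (edges : List (List Int)) (x y : Int) : Prop := ∃ e ∈ edges, x ∈ e ∧ y ∈ e

-- connectivity
def pvReach (edges : List (List Int)) : Int → Int → Prop := Relation.ReflTransGen (pvStep edges)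

-- C absorbs every edge it touches
def pvClosed (edges : List (List Int)) (C : List Int) : Prop :=
  ∀ e ∈ edges, (∃ x ∈ e, x ∈ C) → ∀ y ∈ e, y ∈ C

-- the canonical component of v (this is exactly what B computes for a seed v)
def pvK (edges : List (List Int)) (v : Int) : List Int :=
  PySem.List.sorted (pvFlood edges (pvVerts edges) (PySem.Set.ofList [v])) (fun x => x) false

-- canonical component listing over a worklist of seeds
def pvCanon (edges : List (List Int)) : List Int → List (List Int)
  | [] => []
  | v :: rest => pvK edges v :: pvCanon edges (rest.filter (fun u => decide (u ∉ pvK edges v)))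
termination_by l => l.length
decreasing_by simpa using le_trans (List.length_filter_le _ _) (le_of_eq List.length_attach)

-- ---- sorted-set toolkit ----
theorem pvStrictNodup {l : List Int} (h : l.Pairwise (· < ·)) : l.Nodup :=
  h.imp ne_of_lt

theorem pvStrictEq {l₁ l₂ : List Int} (h₁ : l₁.Pairwise (· < ·)) (h₂ : l₂.Pairwise (· < ·))
    (h : ∀ x, x ∈ l₁ ↔ x ∈ l₂) : l₁ = l₂ :=
  ((List.perm_ext_iff_of_nodup (pvStrictNodup h₁) (pvStrictNodup h₂)).2 h).eq_of_pairwise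
    (fun a b _ _ hab hba => le_antisymm hab hba) (h₁.imp le_of_lt) (h₂.imp le_of_lt)

theorem pvSortedStrict (c : List Int) (h : c.Nodup) :
    (PySem.List.sorted c (fun x => x) false).Pairwise (· < ·) := by
  have hle : (PySem.List.sorted c (fun x => x) false).Pairwise (· ≤ ·) := by
    simpa using PySem.List.sorted_pairwise (xs := c) (key := fun x => x)
  have hnd : (PySem.List.sorted c (fun x => x) false).Nodup :=
    (PySem.List.sorted_perm (xs := c) (key := fun x => x) (rev := false)).symm.nodup h
  exact (hle.and hnd).imp fun hp => lt_of_le_of_ne hp.1 hp.2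

theorem pvNodupSubLen {l l' : List Int} (h : l.Nodup) (hs : ∀ x ∈ l, x ∈ l') :
    l.length ≤ l'.length :=
  (List.subperm_of_subset h hs).length_le

-- ---- A's helpers ----
theorem mem_pvUnion2 (a b : List Int) (x : Int) : x ∈ pvUnion2 a b ↔ x ∈ a ∨ x ∈ b := by
  simp [pvUnion2, PySem.List.mem_sorted, PySem.Set.mem_union, PySem.Set.mem_ofList]

theorem strict_pvUnion2 (a b : List Int) : (pvUnion2 a b).Pairwise (· < ·) :=
  pvSortedStrict _ (PySem.Set.nodup_union _ _ (PySem.Set.nodup_ofList a))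

theorem pvUnion_pair (a b : List Int) : pvUnion [a, b] = pvUnion2 (pvUnion2 [] a) b := rfl

theorem mem_pvUnion_pair (a b : List Int) (x : Int) : x ∈ pvUnion [a, b] ↔ x ∈ a ∨ x ∈ b := by
  rw [pvUnion_pair]; simp [mem_pvUnion2]

theorem strict_pvUnion_pair (a b : List Int) : (pvUnion [a, b]).Pairwise (· < ·) := by
  rw [pvUnion_pair]; exact strict_pvUnion2 _ _

theorem mem_pvSetdiff (a b : List Int) (x : Int) : x ∈ pvSetdiff a b ↔ x ∈ a ∧ x ∉ b := by
  simp [pvSetdiff, PySem.List.mem_sorted, PySem.Set.mem_diff, PySem.Set.mem_ofList]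

theorem strict_pvSetdiff (a b : List Int) : (pvSetdiff a b).Pairwise (· < ·) :=
  pvSortedStrict _ (PySem.Set.nodup_diff _ _ (PySem.Set.nodup_ofList a))

theorem strict_pvVerts (edges : List (List Int)) : (pvVerts edges).Pairwise (· < ·) :=
  PySem.List.sorted_ofList_pairwise_lt edges.flatten

theorem mem_pvVerts (edges : List (List Int)) (x : Int) :
    x ∈ pvVerts edges ↔ x ∈ edges.flatten := by
  simp [pvVerts, PySem.List.mem_sorted, PySem.Set.mem_ofList]

theorem foldl_pvUnion_mem' (cs : List (List Int)) :
    ∀ acc : List Int, acc.Pairwise (· < ·) →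
    ((cs.foldl (fun la el => pvUnion [la, el]) acc).Pairwise (· < ·) ∧
      ∀ x, x ∈ cs.foldl (fun la el => pvUnion [la, el]) acc ↔ x ∈ acc ∨ ∃ c ∈ cs, x ∈ c) := by
  induction cs with
  | nil => intro acc hacc; simpa using hacc
  | cons c cs ih =>
    intro acc hacc
    simp only [List.foldl_cons]
    obtain ⟨hs, hm⟩ := ih (pvUnion [acc, c]) (strict_pvUnion_pair _ _)
    refine ⟨hs, fun x => ?_⟩
    rw [hm x, mem_pvUnion_pair]
    simp only [List.mem_cons]
    constructor
    · rintro ((h | h) | ⟨d, hd, hx⟩)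
      · exact Or.inl h
      · exact Or.inr ⟨c, Or.inl rfl, h⟩
      · exact Or.inr ⟨d, Or.inr hd, hx⟩
    · rintro (h | ⟨d, (rfl | hd), hx⟩)
      · exact Or.inl (Or.inl h)
      · exact Or.inl (Or.inr hx)
      · exact Or.inr ⟨d, hd, hx⟩

theorem pvUniqueA_eq_pvVerts (edges : List (List Int)) : pvUniqueA edges = pvVerts edges := by
  obtain ⟨hs, hm⟩ := foldl_pvUnion_mem' edges [] (by simp)
  refine pvStrictEq hs (strict_pvVerts edges) fun x => ?_
  rw [pvUniqueA, hm x, mem_pvVerts]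
  simp [List.mem_flatten]

theorem pvIsline_iff (edges : List (List Int)) (j k : Int) :
    pvIsline [j, k] edges = true ↔ pvStep edges j k := by
  by_cases h : edges = []
  · subst h; simp [pvIsline, pvStep]
  · simp only [pvIsline, if_neg h, List.any_eq_true, pvStep]
    constructor
    · rintro ⟨e, he, hsub⟩
      have hall := (PySem.Set.issubset_iff _ _).1 hsub
      refine ⟨e, he, ?_, ?_⟩
      · have := hall j (by simp [PySem.Set.mem_ofList]); simpa [PySem.Set.mem_ofList] using this
      · have := hall k (by simp [PySem.Set.mem_ofList]); simpa [PySem.Set.mem_ofList] using this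
    · rintro ⟨e, he, hj, hk⟩
      refine ⟨e, he, (PySem.Set.issubset_iff _ _).2 fun x hx => ?_⟩
      rw [PySem.Set.mem_ofList] at hx ⊢
      simp only [List.mem_cons, List.not_mem_nil, or_false] at hx
      rcases hx with rfl | rfl
      · exact hj
      · exact hk

-- ---- sweep / flood ----
theorem pvSweepFold_append (l : List (List Int)) :
    ∀ c : PySem.Set Int, ∃ t, l.foldl (fun c e => if PySem.Set.isdisjoint c e then c else PySem.Set.update c e) c = c ++ t := by
  induction l with
  | nil => exact fun c => ⟨[], by simp⟩
  | cons e l ih =>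
    intro c
    simp only [List.foldl_cons]
    by_cases hd : PySem.Set.isdisjoint c e
    · obtain ⟨t2, h2⟩ := ih c
      exact ⟨t2, by rwa [if_pos hd]⟩
    · obtain ⟨t2, h2⟩ := ih (PySem.Set.update c e)
      refine ⟨(PySem.Set.ofList e).filter (fun y => !(PySem.Set.contains c y)) ++ t2, ?_⟩
      rw [if_neg hd, h2, PySem.Set.update_eq_append_filter, List.append_assoc]

theorem pvSweep_superset (edges : List (List Int)) (c : PySem.Set Int) (x : Int) (hx : x ∈ c) :
    x ∈ pvSweep edges c := by
  obtain ⟨t, ht⟩ := pvSweepFold_append edges c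
  rw [pvSweep, ht]
  exact List.mem_append_left _ hx

theorem pvSweepFold_nodup (l : List (List Int)) :
    ∀ c : PySem.Set Int, c.Nodup →
    (l.foldl (fun c e => if PySem.Set.isdisjoint c e then c else PySem.Set.update c e) c).Nodup := by
  induction l with
  | nil => exact fun c h => h
  | cons e l ih =>
    intro c hc
    simp only [List.foldl_cons]
    by_cases hd : PySem.Set.isdisjoint c e
    · rw [if_pos hd]; exact ih c hc
    · rw [if_neg hd]; exact ih _ (PySem.Set.nodup_update c e hc)

theorem pvSweep_nodup (edges : List (List Int)) (c : PySem.Set Int) (h : c.Nodup) :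
    (pvSweep edges c).Nodup := pvSweepFold_nodup edges c h

theorem pvSweepFold_mem (l : List (List Int)) :
    ∀ (c : PySem.Set Int) (x : Int),
    x ∈ l.foldl (fun c e => if PySem.Set.isdisjoint c e then c else PySem.Set.update c e) c →
    x ∈ c ∨ x ∈ l.flatten := by
  induction l with
  | nil => exact fun c x h => Or.inl h
  | cons e l ih =>
    intro c x hx
    simp only [List.foldl_cons] at hx
    by_cases hd : PySem.Set.isdisjoint c e
    · rw [if_pos hd] at hx
      rcases ih c x hx with h | h
      · exact Or.inl h
      · exact Or.inr (by simp [List.flatten_cons, h])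
    · rw [if_neg hd] at hx
      rcases ih _ x hx with h | h
      · rcases (PySem.Set.mem_update _ _ _).1 h with h' | h'
        · exact Or.inl h'
        · exact Or.inr (by simp [List.flatten_cons, h'])
      · exact Or.inr (by simp [List.flatten_cons, h])

theorem pvSweep_mem (edges : List (List Int)) (c : PySem.Set Int) (x : Int)
    (hx : x ∈ pvSweep edges c) : x ∈ c ∨ x ∈ edges.flatten :=
  pvSweepFold_mem edges c x hx

theorem pvNotDisjoint (c : PySem.Set Int) (t : List Int)
    (h : PySem.Set.isdisjoint c t = false) : ∃ x ∈ c, x ∈ t := by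
  by_contra hc
  push Not at hc
  rw [(PySem.Set.isdisjoint_iff c t).2 hc] at h
  cases h

theorem pvSweepFold_reach (edges : List (List Int)) (v : Int) (l : List (List Int))
    (hl : ∀ e ∈ l, e ∈ edges) :
    ∀ c : PySem.Set Int, (∀ x ∈ c, pvReach edges v x) →
    ∀ x ∈ l.foldl (fun c e => if PySem.Set.isdisjoint c e then c else PySem.Set.update c e) c,
      pvReach edges v x := by
  induction l with
  | nil => exact fun c h => h
  | cons e l ih =>
    intro c hc
    simp only [List.foldl_cons]
    by_cases hd : PySem.Set.isdisjoint c e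
    · rw [if_pos hd]
      exact ih (fun e' he' => hl e' (List.mem_cons_of_mem _ he')) c hc
    · rw [if_neg hd]
      refine ih (fun e' he' => hl e' (List.mem_cons_of_mem _ he')) _ ?_
      intro x hx
      rcases (PySem.Set.mem_update _ _ _).1 hx with h' | h'
      · exact hc x h'
      · obtain ⟨y, hyc, hye⟩ := pvNotDisjoint c e (Bool.eq_false_iff.2 hd)
        exact Relation.ReflTransGen.tail (hc y hyc)
          ⟨e, hl e (List.mem_cons_self), hye, h'⟩

theorem pvSweep_reach (edges : List (List Int)) (v : Int) (c : PySem.Set Int)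
    (h : ∀ x ∈ c, pvReach edges v x) : ∀ x ∈ pvSweep edges c, pvReach edges v x :=
  pvSweepFold_reach edges v edges (fun _ he => he) c h

theorem pvSweepFold_fix (l : List (List Int)) :
    ∀ c : PySem.Set Int,
    l.foldl (fun c e => if PySem.Set.isdisjoint c e then c else PySem.Set.update c e) c = c →
    ∀ e ∈ l, (∃ x ∈ e, x ∈ c) → ∀ y ∈ e, y ∈ c := by
  induction l with
  | nil => intro c _ e he; cases he
  | cons e l ih =>
    intro c hfix e' he'
    simp only [List.foldl_cons] at hfix
    have hstep : ∃ t1, (if PySem.Set.isdisjoint c e then c else PySem.Set.update c e) = c ++ t1 := by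
      by_cases hd : PySem.Set.isdisjoint c e
      · exact ⟨[], by rw [if_pos hd]; simp⟩
      · exact ⟨_, by rw [if_neg hd]; exact PySem.Set.update_eq_append_filter c e⟩
    obtain ⟨t1, ht1⟩ := hstep
    obtain ⟨t2, ht2⟩ := pvSweepFold_append l (c ++ t1)
    rw [ht1, ht2] at hfix
    have hts := congrArg List.length hfix
    simp at hts
    obtain ⟨ht1e, ht2e⟩ := hts
    subst ht1e; subst ht2e
    simp only [List.append_nil] at ht1 ht2
    rcases List.mem_cons.1 he' with rfl | hmem
    · intro hhit y hy
      by_cases hd : PySem.Set.isdisjoint c e'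
      · obtain ⟨x, hxe, hxc⟩ := hhit
        exact absurd hxe ((PySem.Set.isdisjoint_iff c e').1 hd x hxc).elim
      · rw [if_neg hd] at ht1
        rw [← ht1]
        exact (PySem.Set.mem_update _ _ _).2 (Or.inr hy)
    · exact ih c ht2 e' hmem

theorem pvSweep_fix_closed (edges : List (List Int)) (c : PySem.Set Int)
    (h : pvSweep edges c = c) : pvClosed edges c :=
  fun e he hhit => pvSweepFold_fix edges c h e he hhit

theorem pvFlood_superset (edges : List (List Int)) (vs : List Int) (c : PySem.Set Int) (x : Int)
    (hx : x ∈ c) : x ∈ pvFlood edges vs c := by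
  unfold pvFlood
  induction vs generalizing c with
  | nil => exact hx
  | cons v vs ih => exact ih _ (pvSweep_superset edges c x hx)

theorem pvFlood_nodup (edges : List (List Int)) (vs : List Int) (c : PySem.Set Int) (h : c.Nodup) :
    (pvFlood edges vs c).Nodup := by
  unfold pvFlood
  induction vs generalizing c with
  | nil => exact h
  | cons v vs ih => exact ih _ (pvSweep_nodup edges c h)

theorem pvFlood_reach (edges : List (List Int)) (vs : List Int) (v : Int) (c : PySem.Set Int)
    (h : ∀ x ∈ c, pvReach edges v x) : ∀ x ∈ pvFlood edges vs c, pvReach edges v x := by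
  unfold pvFlood
  induction vs generalizing c with
  | nil => exact h
  | cons w vs ih => exact ih _ (pvSweep_reach edges v c h)

theorem pvSweep_persist (edges : List (List Int)) (its : List Int) :
    ∀ c : PySem.Set Int, pvSweep edges c = c →
    its.foldl (fun c _ => pvSweep edges c) c = c := by
  induction its with
  | nil => intro c _; rfl
  | cons i its ih => intro c h; simp only [List.foldl_cons, h]; exact ih c h

theorem pvFloodFix_aux (edges : List (List Int)) (vs : List Int)
    (hflat : ∀ x ∈ edges.flatten, x ∈ vs) :
    ∀ (its : List Int) (c : PySem.Set Int), c.Nodup → (∀ x ∈ c, x ∈ vs) →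
    vs.length < c.length + its.length + 1 →
    pvSweep edges (its.foldl (fun c _ => pvSweep edges c) c)
      = its.foldl (fun c _ => pvSweep edges c) c := by
  intro its
  induction its with
  | nil =>
    intro c hc hsub hlen
    simp only [List.foldl_nil]
    -- here |vs| ≤ |c|, c ⊆ vs, both nodup: c exhausts vs, so nothing can be added
    have hcle : c.length ≤ vs.length := pvNodupSubLen hc hsub
    have hperm : c.Perm vs :=
      (List.subperm_of_subset hc hsub).perm_of_length_le (by simp at hlen; omega)
    obtain ⟨t, ht⟩ := pvSweepFold_append edges c
    have htsub : ∀ x ∈ t, x ∈ c := by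
      intro x hx
      have hxm : x ∈ pvSweep edges c := by rw [pvSweep, ht]; exact List.mem_append_right _ hx
      rcases pvSweep_mem edges c x hxm with h | h
      · exact h
      · exact hperm.mem_iff.2 (hflat x h)
    have hnd : (c ++ t).Nodup := by rw [← ht]; exact pvSweep_nodup edges c hc
    have : t = [] := by
      cases t with
      | nil => rfl
      | cons y t' =>
        exact absurd ((List.disjoint_of_nodup_append hnd) (htsub y List.mem_cons_self)
          List.mem_cons_self) (fun h => h)
    rw [pvSweep, ht, this, List.append_nil]
  | cons i its ih =>
    intro c hc hsub hlen
    simp only [List.foldl_cons]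
    by_cases hfix : pvSweep edges c = c
    · rw [hfix, pvSweep_persist edges its c hfix]
      exact hfix
    · obtain ⟨t, ht⟩ := pvSweepFold_append edges c
      have htne : t ≠ [] := by
        intro h; rw [h, List.append_nil] at ht; exact hfix ht
      have hgrow : c.length + 1 ≤ (pvSweep edges c).length := by
        rw [pvSweep, ht, List.length_append]
        cases t with
        | nil => exact absurd rfl htne
        | cons y t' => simp
      refine ih (pvSweep edges c) (pvSweep_nodup edges c hc) ?_ (by simp at hlen ⊢; omega)
      intro x hx
      rcases pvSweep_mem edges c x hx with h | h
      · exact hsub x h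
      · exact hflat x h

theorem pvFlood_fix (edges : List (List Int)) (c : PySem.Set Int)
    (hc : c.Nodup) (hsub : ∀ x ∈ c, x ∈ pvVerts edges) :
    pvSweep edges (pvFlood edges (pvVerts edges) c) = pvFlood edges (pvVerts edges) c := by
  unfold pvFlood
  exact pvFloodFix_aux edges (pvVerts edges)
    (fun x hx => (mem_pvVerts edges x).2 hx) (pvVerts edges) c hc hsub (by omega)

theorem mem_pvK (edges : List (List Int)) (v : Int) (hv : v ∈ pvVerts edges) (u : Int) :
    u ∈ pvK edges v ↔ pvReach edges v u := by
  have hbase : ∀ x ∈ PySem.Set.ofList [v], pvReach edges v x := by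
    intro x hx
    rw [PySem.Set.mem_ofList] at hx
    simp only [List.mem_singleton] at hx
    subst hx; exact Relation.ReflTransGen.refl
  have hsub : ∀ x ∈ PySem.Set.ofList [v], x ∈ pvVerts edges := by
    intro x hx
    rw [PySem.Set.mem_ofList] at hx
    simp only [List.mem_singleton] at hx
    subst hx; exact hv
  have hclosed : pvClosed edges (pvFlood edges (pvVerts edges) (PySem.Set.ofList [v])) :=
    pvSweep_fix_closed edges _ (pvFlood_fix edges _ (PySem.Set.nodup_ofList [v]) hsub)
  rw [pvK, PySem.List.mem_sorted]
  constructor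
  · exact fun h => pvFlood_reach edges (pvVerts edges) v _ hbase u h
  · intro h
    induction h with
    | refl =>
      exact pvFlood_superset edges _ _ v (by rw [PySem.Set.mem_ofList]; simp)
    | tail hab hbc ihb =>
      obtain ⟨e, he, hb, hc⟩ := hbc
      exact hclosed e he ⟨_, hb, ihb⟩ _ hc

theorem strict_pvK (edges : List (List Int)) (v : Int) : (pvK edges v).Pairwise (· < ·) :=
  pvSortedStrict _ (pvFlood_nodup edges _ _ (PySem.Set.nodup_ofList [v]))

theorem closed_pvK (edges : List (List Int)) (v : Int) (hv : v ∈ pvVerts edges) :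
    pvClosed edges (pvK edges v) := by
  intro e he hhit y hy
  rw [pvK, PySem.List.mem_sorted] at *
  have hsub : ∀ x ∈ PySem.Set.ofList [v], x ∈ pvVerts edges := by
    intro x hx
    rw [PySem.Set.mem_ofList] at hx
    simp only [List.mem_singleton] at hx
    subst hx; exact hv
  have hclosed := pvSweep_fix_closed edges _ (pvFlood_fix edges _ (PySem.Set.nodup_ofList [v]) hsub)
  obtain ⟨x, hxe, hxK⟩ := hhit
  rw [PySem.List.mem_sorted] at hxK
  exact hclosed e he ⟨x, hxe, hxK⟩ y hy

theorem reach_mem_pvVerts (edges : List (List Int)) (v u : Int) (h : pvReach edges v u) :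
    u = v ∨ u ∈ pvVerts edges := by
  induction h with
  | refl => exact Or.inl rfl
  | tail hab hbc ih =>
    obtain ⟨e, he, _, hc⟩ := hbc
    exact Or.inr ((mem_pvVerts edges _).2 (List.mem_flatten.2 ⟨e, he, hc⟩))

-- ---- B equals the canonical listing ----
theorem altFold_spec (edges : List (List Int)) :
    ∀ (R : List Int) (out : List (List Int)) (seen : PySem.Set Int),
    (R.foldl (fun (st : List (List Int) × PySem.Set Int) v =>
      if st.2.contains v then st
      else
        let comp := PySem.List.sorted (pvFlood edges (pvVerts edges) (PySem.Set.ofList [v])) (fun x => x) false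
        (st.1 ++ [comp], PySem.Set.update st.2 comp))
      (out, seen)).1
    = out ++ pvCanon edges (R.filter (fun u => decide (u ∉ seen))) := by
  intro R
  induction R with
  | nil => intro out seen; simp [pvCanon]
  | cons v R ih =>
    intro out seen
    simp only [List.foldl_cons]
    by_cases hv : PySem.Set.contains seen v
    · have hvs : v ∈ seen := (PySem.Set.contains_iff seen v).1 hv
      rw [if_pos hv, ih out seen, List.filter_cons]
      simp [hvs]
    · have hvs : v ∉ seen := fun h => hv ((PySem.Set.contains_iff seen v).2 h)
      rw [if_neg hv]
      rw [ih]
      have hfc : (v :: R).filter (fun u => decide (u ∉ seen))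
          = v :: R.filter (fun u => decide (u ∉ seen)) := by
        rw [List.filter_cons]; simp [hvs]
      rw [hfc]
      have hcanon : pvCanon edges (v :: R.filter (fun u => decide (u ∉ seen)))
          = pvK edges v :: pvCanon edges
              ((R.filter (fun u => decide (u ∉ seen))).filter (fun u => decide (u ∉ pvK edges v))) := by
        simp [pvCanon]
      rw [hcanon]
      have hff : (R.filter (fun u => decide (u ∉ seen))).filter (fun u => decide (u ∉ pvK edges v))
          = R.filter (fun u => decide (u ∉ PySem.Set.update seen (pvK edges v))) := by
        rw [List.filter_filter]
        apply List.filter_congr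
        intro u _
        simp [PySem.Set.mem_update, not_or, Bool.and_comm]
      rw [show (PySem.List.sorted (pvFlood edges (pvVerts edges) (PySem.Set.ofList [v])) (fun x => x) false) = pvK edges v from rfl,
        List.append_assoc, ← hff]
      rfl

theorem alt_eq_canon (edges : List (List Int)) :
    components_edges_alt edges = pvCanon edges (pvVerts edges) := by
  have h := altFold_spec edges (pvVerts edges) [] PySem.Set.empty
  have hfilter : (pvVerts edges).filter (fun u => decide (u ∉ PySem.Set.empty)) = pvVerts edges := by
    apply List.filter_eq_self.2
    intro u _
    simp [PySem.Set.empty]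
  rw [hfilter] at h
  simpa [components_edges_alt] using h

-- ---- A's inner loop computes the canonical component ----
def pvInv (edges : List (List Int)) (T : List Int) (t0 : Int) (c : List Int) : Prop :=
  c.Pairwise (· < ·) ∧ t0 ∈ c ∧ (∀ x ∈ c, x ∈ T) ∧ (∀ x ∈ c, pvReach edges t0 x)

theorem mem_passStep (edges : List (List Int)) (c : List Int) (j x : Int) :
    x ∈ (if c.any (fun k => pvIsline [j, k] edges) then pvUnion [c, [j]] else c) ↔
      x ∈ c ∨ (x = j ∧ c.any (fun k => pvIsline [j, k] edges) = true) := by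
  by_cases h : c.any (fun k => pvIsline [j, k] edges)
  · rw [if_pos h, mem_pvUnion_pair]
    simp [h]
  · rw [if_neg h]
    simp [h]

theorem pvPassFold_superset (edges : List (List Int)) (D : List Int) :
    ∀ (c : List Int) (x : Int), x ∈ c →
    x ∈ D.foldl (fun c j => if c.any (fun k => pvIsline [j, k] edges) then pvUnion [c, [j]] else c) c := by
  induction D with
  | nil => exact fun c x hx => hx
  | cons j D ih =>
    intro c x hx
    simp only [List.foldl_cons]
    exact ih _ x ((mem_passStep edges c j x).2 (Or.inl hx))

theorem pvGrowPass_superset (edges : List (List Int)) (T c : List Int) (x : Int) (hx : x ∈ c) :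
    x ∈ pvGrowPass edges T c :=
  pvPassFold_superset edges _ c x hx

theorem strict_passStep (edges : List (List Int)) (c : List Int) (j : Int)
    (hc : c.Pairwise (· < ·)) :
    (if c.any (fun k => pvIsline [j, k] edges) then pvUnion [c, [j]] else c).Pairwise (· < ·) := by
  by_cases h : c.any (fun k => pvIsline [j, k] edges)
  · rw [if_pos h]; exact strict_pvUnion_pair c [j]
  · rwa [if_neg h]

theorem pvPassFold_inv (edges : List (List Int)) (T : List Int) (t0 : Int) (D : List Int) :
    ∀ c : List Int, (∀ j ∈ D, j ∈ T) → pvInv edges T t0 c →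
    pvInv edges T t0
      (D.foldl (fun c j => if c.any (fun k => pvIsline [j, k] edges) then pvUnion [c, [j]] else c) c) := by
  induction D with
  | nil => exact fun c _ h => h
  | cons j D ih =>
    intro c hD ⟨hs, ht0, hsub, hreach⟩
    simp only [List.foldl_cons]
    refine ih _ (fun j' hj' => hD j' (List.mem_cons_of_mem _ hj')) ?_
    refine ⟨strict_passStep edges c j hs, (mem_passStep edges c j t0).2 (Or.inl ht0), ?_, ?_⟩
    · intro x hx
      rcases (mem_passStep edges c j x).1 hx with h | ⟨rfl, _⟩
      · exact hsub x h
      · exact hD x List.mem_cons_self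
    · intro x hx
      rcases (mem_passStep edges c j x).1 hx with h | ⟨rfl, hany⟩
      · exact hreach x h
      · obtain ⟨k, hk, hline⟩ := List.any_eq_true.1 hany
        obtain ⟨e, he, hje, hke⟩ := (pvIsline_iff edges x k).1 hline
        exact Relation.ReflTransGen.tail (hreach k hk) ⟨e, he, hke, hje⟩

theorem pvGrowPass_inv (edges : List (List Int)) (T : List Int) (t0 : Int) (c : List Int)
    (h : pvInv edges T t0 c) : pvInv edges T t0 (pvGrowPass edges T c) :=
  pvPassFold_inv edges T t0 (pvSetdiff T c) c
    (fun j hj => ((mem_pvSetdiff T c j).1 hj).1) h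

theorem pvPassFold_fix (edges : List (List Int)) (D : List Int) :
    ∀ c : List Int, c.Pairwise (· < ·) →
    D.foldl (fun c j => if c.any (fun k => pvIsline [j, k] edges) then pvUnion [c, [j]] else c) c = c →
    ∀ j ∈ D, j ∉ c → c.any (fun k => pvIsline [j, k] edges) = false := by
  induction D with
  | nil => intro c _ _ j hj; cases hj
  | cons j D ih =>
    intro c hc hfix j' hj' hj'c
    simp only [List.foldl_cons] at hfix
    have hstep_eq : (if c.any (fun k => pvIsline [j, k] edges) then pvUnion [c, [j]] else c) = c := by
      apply pvStrictEq (strict_passStep edges c j hc) hc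
      intro x
      constructor
      · intro hx
        have := pvPassFold_superset edges D _ x hx
        rwa [hfix] at this
      · exact fun hx => (mem_passStep edges c j x).2 (Or.inl hx)
    rcases List.mem_cons.1 hj' with rfl | hmem
    · by_cases hany : c.any (fun k => pvIsline [j', k] edges)
      · exfalso
        rw [if_pos hany] at hstep_eq
        have : j' ∈ pvUnion [c, [j']] := (mem_pvUnion_pair c [j'] j').2 (Or.inr (by simp))
        rw [hstep_eq] at this
        exact hj'c this
      · exact Bool.eq_false_iff.2 hany
    · rw [hstep_eq] at hfix
      exact ih c hc hfix j' hmem hj'c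

theorem pvGrowPass_fix (edges : List (List Int)) (T c : List Int) (hc : c.Pairwise (· < ·))
    (h : pvGrowPass edges T c = c) :
    ∀ j ∈ T, j ∉ c → ∀ k ∈ c, ¬ pvStep edges j k := by
  intro j hjT hjc k hk hstep
  have hfalse := pvPassFold_fix edges (pvSetdiff T c) c hc h j
    ((mem_pvSetdiff T c j).2 ⟨hjT, hjc⟩) hjc
  have : c.any (fun k => pvIsline [j, k] edges) = true :=
    List.any_eq_true.2 ⟨k, hk, (pvIsline_iff edges j k).2 hstep⟩
  rw [hfalse] at this
  cases this

theorem pvGrowLoop_spec (edges : List (List Int)) (T : List Int) (t0 : Int) :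
    ∀ (fuel : Nat) (n : Int) (c : List Int),
    pvInv edges T t0 c →
    (n = PySem.List.len c → pvGrowPass edges T c = c) →
    T.length + 2 ≤ fuel + c.length →
    pvInv edges T t0 (pvGrowLoop edges T fuel n c) ∧
      pvGrowPass edges T (pvGrowLoop edges T fuel n c) = pvGrowLoop edges T fuel n c := by
  intro fuel
  induction fuel with
  | zero =>
    intro n c hinv _ hfuel
    exfalso
    have : c.length ≤ T.length := pvNodupSubLen (pvStrictNodup hinv.1) hinv.2.2.1
    omega
  | succ fuel ih =>
    intro n c hinv hn hfuel
    by_cases hcond : n = PySem.List.len c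
    · simp only [pvGrowLoop, if_pos hcond]
      exact ⟨hinv, hn hcond⟩
    · simp only [pvGrowLoop, if_neg hcond]
      have hinv' : pvInv edges T t0 (pvGrowPass edges T c) := pvGrowPass_inv edges T t0 c hinv
      have hsubc : ∀ x ∈ c, x ∈ pvGrowPass edges T c := fun x hx => pvGrowPass_superset edges T c x hx
      have hlenle : c.length ≤ (pvGrowPass edges T c).length :=
        pvNodupSubLen (pvStrictNodup hinv.1) hsubc
      by_cases heq : (pvGrowPass edges T c).length = c.length
      · -- the pass did not grow the component: it is already a fixpoint
        have hceq : pvGrowPass edges T c = c := by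
          apply pvStrictEq hinv'.1 hinv.1
          intro x
          constructor
          · intro hx
            have hperm : c.Perm (pvGrowPass edges T c) :=
              (List.subperm_of_subset (pvStrictNodup hinv.1) hsubc).perm_of_length_le (by omega)
            exact hperm.mem_iff.2 hx
          · exact fun hx => hsubc x hx
        rw [hceq]
        have hstop : ∀ f : Nat, pvGrowLoop edges T f (PySem.List.len c) c = c := by
          intro f; cases f <;> simp [pvGrowLoop]
        rw [hstop fuel]
        exact ⟨hinv, hceq⟩
      · -- the component grew strictly
        refine ih (PySem.List.len c) (pvGrowPass edges T c) hinv' ?_ (by omega)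
        intro h
        exfalso
        rw [PySem.List.len_eq, PySem.List.len_eq] at h
        exact heq (by exact_mod_cast h.symm)

theorem pvGrow_eq_pvK (edges : List (List Int)) (T L : List Int) (t0 : Int)
    (hmemT : ∀ x, x ∈ T ↔ x ∈ pvVerts edges ∧ x ∉ L)
    (hLc : pvClosed edges L) (ht0 : t0 ∈ T) :
    pvGrowLoop edges T (T.length + 2) 0 [t0] = pvK edges t0 := by
  have hinv0 : pvInv edges T t0 [t0] := by
    refine ⟨by simp, by simp, ?_, ?_⟩
    · intro x hx; simp only [List.mem_singleton] at hx; subst hx; exact ht0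
    · intro x hx; simp only [List.mem_singleton] at hx; subst hx; exact Relation.ReflTransGen.refl
  obtain ⟨hinvR, hfixR⟩ := pvGrowLoop_spec edges T t0 (T.length + 2) 0 [t0] hinv0
    (by intro h; rw [PySem.List.len_eq] at h; simp at h) (by omega)
  set R := pvGrowLoop edges T (T.length + 2) 0 [t0] with hR
  have ht0V : t0 ∈ pvVerts edges := ((hmemT t0).1 ht0).1
  have hRT : ∀ x ∈ R, x ∈ T := hinvR.2.2.1
  apply pvStrictEq hinvR.1 (strict_pvK edges t0)
  intro u
  rw [mem_pvK edges t0 ht0V u]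
  constructor
  · exact fun hu => hinvR.2.2.2 u hu
  · intro hreach
    induction hreach with
    | refl => exact hinvR.2.1
    | @tail b cc hab hbc ihb =>
      obtain ⟨e, he, hb, hc⟩ := hbc
      have hbR : b ∈ R := ihb
      have hcV : cc ∈ pvVerts edges := (mem_pvVerts edges cc).2 (List.mem_flatten.2 ⟨e, he, hc⟩)
      have hcL : cc ∉ L := by
        intro hcl
        have hbL : b ∈ L := hLc e he ⟨cc, hc, hcl⟩ b hb
        exact ((hmemT b).1 (hRT b hbR)).2 hbL
      have hcT : cc ∈ T := (hmemT cc).2 ⟨hcV, hcL⟩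
      by_cases hcR : cc ∈ R
      · exact hcR
      · exfalso
        exact pvGrowPass_fix edges T R hinvR.1 hfixR cc hcT hcR b hbR ⟨e, he, hc, hb⟩

-- ---- A's outer loop ----
theorem pvOuter_spec (edges : List (List Int)) :
    ∀ (fuel : Nat) (temp : List Int) (C : List (List Int)) (L : List Int),
    L.Pairwise (· < ·) →
    (∀ x ∈ L, x ∈ pvVerts edges) →
    pvClosed edges L →
    (∀ x, x ∈ pvVerts edges → x ∉ L → x ∈ temp) →
    (∀ x ∈ temp, x ∈ pvVerts edges) →
    (∀ c ∈ C, ∀ x ∈ c, x ∈ L) →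
    (pvVerts edges).length + 1 ≤ fuel + L.length →
    pvOuter edges (PySem.List.len (pvVerts edges)) fuel temp C L
      = C ++ pvCanon edges ((pvVerts edges).filter (fun u => decide (u ∉ L))) := by
  intro fuel
  induction fuel with
  | zero =>
    intro temp C L hL hLsub _ _ _ _ hfuel
    exfalso
    have := pvNodupSubLen (pvStrictNodup hL) hLsub
    omega
  | succ fuel ih =>
    intro temp C L hL hLsub hLc htemp htsub hCL hfuel
    by_cases hguard : PySem.List.len L = PySem.List.len (pvVerts edges)
    · -- all vertices placed: the remaining worklist is empty
      have hlen : L.length = (pvVerts edges).length := by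
        rw [PySem.List.len_eq, PySem.List.len_eq] at hguard; exact_mod_cast hguard
      have hperm : L.Perm (pvVerts edges) :=
        (List.subperm_of_subset (pvStrictNodup hL) hLsub).perm_of_length_le (by omega)
      have hfil : (pvVerts edges).filter (fun u => decide (u ∉ L)) = [] := by
        rw [List.filter_eq_nil_iff]
        intro x hx
        simp [hperm.mem_iff.2 hx]
      rw [hfil]
      simp only [pvOuter, if_pos hguard, pvCanon, List.append_nil]
    · have hTstrict : (PySem.List.sorted (pvSetdiff temp L) (fun x => x) false).Pairwise (· < ·) :=
        pvSortedStrict _ (pvStrictNodup (strict_pvSetdiff temp L))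
      have hFstrict : ((pvVerts edges).filter (fun u => decide (u ∉ L))).Pairwise (· < ·) :=
        (strict_pvVerts edges).filter _
      have hTeq : PySem.List.sorted (pvSetdiff temp L) (fun x => x) false
          = (pvVerts edges).filter (fun u => decide (u ∉ L)) := by
        apply pvStrictEq hTstrict hFstrict
        intro x
        rw [PySem.List.mem_sorted, mem_pvSetdiff, List.mem_filter]
        constructor
        · rintro ⟨hxt, hxL⟩; exact ⟨htsub x hxt, by simp [hxL]⟩
        · rintro ⟨hxv, hxL⟩
          simp only [decide_eq_true_eq] at hxL
          exact ⟨htemp x hxv hxL, hxL⟩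
      cases hF : (pvVerts edges).filter (fun u => decide (u ∉ L)) with
      | nil =>
        exfalso
        have hVL : ∀ x ∈ pvVerts edges, x ∈ L := by
          intro x hx
          by_contra hxL
          have : x ∈ (pvVerts edges).filter (fun u => decide (u ∉ L)) :=
            List.mem_filter.2 ⟨hx, by simp [hxL]⟩
          rw [hF] at this
          cases this
        have h1 := pvNodupSubLen (pvStrictNodup (strict_pvVerts edges)) hVL
        have h2 := pvNodupSubLen (pvStrictNodup hL) hLsub
        apply hguard
        rw [PySem.List.len_eq, PySem.List.len_eq]
        have : L.length = (pvVerts edges).length := by omega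
        exact_mod_cast this
      | cons t0 rest =>
        rw [hF] at hTeq
        have hmemT' : ∀ x, x ∈ t0 :: rest ↔ x ∈ pvVerts edges ∧ x ∉ L := by
          intro x
          rw [← hF, List.mem_filter]
          simp
        have ht0mem : t0 ∈ t0 :: rest := List.mem_cons_self
        have hcomp : pvGrowLoop edges (t0 :: rest) ((t0 :: rest).length + 2) 0 [t0] = pvK edges t0 :=
          pvGrow_eq_pvK edges (t0 :: rest) L t0 hmemT' hLc ht0mem
        have ht0V : t0 ∈ pvVerts edges := ((hmemT' t0).1 ht0mem).1
        have ht0L : t0 ∉ L := ((hmemT' t0).1 ht0mem).2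
        have ht0K : t0 ∈ pvK edges t0 := (mem_pvK edges t0 ht0V t0).2 Relation.ReflTransGen.refl
        have hKsub : ∀ x ∈ pvK edges t0, x ∈ pvVerts edges := by
          intro x hx
          rcases reach_mem_pvVerts edges t0 x ((mem_pvK edges t0 ht0V x).1 hx) with rfl | h
          · exact ht0V
          · exact h
        -- the new list_all
        obtain ⟨hL's, hL'mem⟩ :=
          foldl_pvUnion_mem' (C ++ [pvGrowLoop edges (t0 :: rest) ((t0 :: rest).length + 2) 0 [t0]]) L hL
        set L' := (C ++ [pvGrowLoop edges (t0 :: rest) ((t0 :: rest).length + 2) 0 [t0]]).foldl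
          (fun la el => pvUnion [la, el]) L with hL'def
        have hL'mem' : ∀ x, x ∈ L' ↔ x ∈ L ∨ x ∈ pvK edges t0 := by
          intro x
          rw [hL'mem x]
          constructor
          · rintro (h | ⟨c, hc, hxc⟩)
            · exact Or.inl h
            · rcases List.mem_append.1 hc with hc | hc
              · exact Or.inl (hCL c hc x hxc)
              · simp only [List.mem_singleton] at hc
                subst hc
                rw [hcomp] at hxc
                exact Or.inr hxc
          · rintro (h | h)
            · exact Or.inl h
            · exact Or.inr ⟨_, List.mem_append_right _ (List.mem_singleton.2 rfl), by rwa [hcomp]⟩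
        have hL'len : L.length + 1 ≤ L'.length := by
          have hnd : (L ++ [t0]).Nodup := by
            simp [List.nodup_append, pvStrictNodup hL]
            exact fun a ha h => ht0L (h ▸ ha)
          have hsub : ∀ x ∈ L ++ [t0], x ∈ L' := by
            intro x hx
            rcases List.mem_append.1 hx with h | h
            · exact (hL'mem' x).2 (Or.inl h)
            · simp only [List.mem_singleton] at h; subst h
              exact (hL'mem' x).2 (Or.inr ht0K)
          have := pvNodupSubLen hnd hsub
          simpa using this
        have hrec := ih (t0 :: rest) (C ++ [pvGrowLoop edges (t0 :: rest) ((t0 :: rest).length + 2) 0 [t0]]) L'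
          hL's
          (by
            intro x hx
            rcases (hL'mem' x).1 hx with h | h
            · exact hLsub x h
            · exact hKsub x h)
          (by
            intro e he hhit y hy
            obtain ⟨x, hxe, hxL'⟩ := hhit
            rcases (hL'mem' x).1 hxL' with h | h
            · exact (hL'mem' y).2 (Or.inl (hLc e he ⟨x, hxe, h⟩ y hy))
            · exact (hL'mem' y).2 (Or.inr (closed_pvK edges t0 ht0V e he ⟨x, hxe, h⟩ y hy)))
          (by
            intro x hxv hxL'
            have hxL : x ∉ L := fun h => hxL' ((hL'mem' x).2 (Or.inl h))
            rw [hmemT' x]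
            exact ⟨hxv, hxL⟩)
          (by intro x hx; exact ((hmemT' x).1 hx).1)
          (by
            intro c hc x hx
            rcases List.mem_append.1 hc with h | h
            · exact (hL'mem' x).2 (Or.inl (hCL c h x hx))
            · simp only [List.mem_singleton] at h; subst h
              rw [hcomp] at hx
              exact (hL'mem' x).2 (Or.inr hx))
          (by omega)
        have hfilter' : (pvVerts edges).filter (fun u => decide (u ∉ L'))
            = rest.filter (fun u => decide (u ∉ pvK edges t0)) := by
          apply pvStrictEq ((strict_pvVerts edges).filter _)
            ((hFstrict.sublist (by rw [hF]; exact List.sublist_cons_self t0 rest)).filter _)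
          intro x
          rw [List.mem_filter, List.mem_filter]
          simp only [decide_eq_true_eq]
          constructor
          · rintro ⟨hxv, hxL'⟩
            have hxL : x ∉ L := fun h => hxL' ((hL'mem' x).2 (Or.inl h))
            have hxK : x ∉ pvK edges t0 := fun h => hxL' ((hL'mem' x).2 (Or.inr h))
            have hxT : x ∈ t0 :: rest := (hmemT' x).2 ⟨hxv, hxL⟩
            rcases List.mem_cons.1 hxT with rfl | h
            · exact absurd ht0K hxK
            · exact ⟨h, hxK⟩
          · rintro ⟨hxr, hxK⟩
            have hxT : x ∈ t0 :: rest := List.mem_cons_of_mem _ hxr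
            obtain ⟨hxv, hxL⟩ := (hmemT' x).1 hxT
            refine ⟨hxv, fun h => ?_⟩
            rcases (hL'mem' x).1 h with h' | h'
            · exact hxL h'
            · exact hxK h'
        have hcanonF : pvCanon edges (t0 :: rest)
            = pvK edges t0 :: pvCanon edges (rest.filter (fun u => decide (u ∉ pvK edges t0))) := by
          simp [pvCanon]
        -- unfold one step of the loop
        simp only [pvOuter, if_neg hguard, hTeq]
        rw [hrec, hfilter', hcanonF]
        simp only [List.append_assoc, List.cons_append, List.nil_append, List.append_cancel_left_eq,
          List.cons.injEq, and_true]
        simpa using hcomp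


theorem a_eq_canon (edges : List (List Int)) :
    components_edges edges = pvCanon edges (pvVerts edges) := by
  have h := pvOuter_spec edges ((pvUniqueA edges).length + 1) (pvUniqueA edges) [] []
    (by simp) (by simp) (by intro e he hhit y hy; obtain ⟨x, _, hx⟩ := hhit; cases hx)
    (by intro x hx _; rwa [pvUniqueA_eq_pvVerts]) (by rw [pvUniqueA_eq_pvVerts]; exact fun x h => h)
    (by intro c hc; cases hc) (by rw [pvUniqueA_eq_pvVerts]; omega)
  have hfil : (pvVerts edges).filter (fun u => decide (u ∉ ([] : List Int))) = pvVerts edges := by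
    apply List.filter_eq_self.2; intro u _; simp
  rw [hfil] at h
  unfold components_edges
  rw [pvUniqueA_eq_pvVerts] at h ⊢
  simpa using h

-- ===== VERDICT (by name: the statement is the Claim_ definition above) =====
theorem components_edges_spec : Claim_equal_components_edges := by
  intro edges _
  unfold Spec_components_edges
  rw [a_eq_canon, alt_eq_canon]
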